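-- pv_equiv track=rewrite | github.com/foerstj/gaspy | printouts/enemy_occurrence.py | get_enemy_template_main_name
-- ===== SOURCE A (Python) =====
-- def get_enemy_template_main_name(template_name: str) -> str:
--     name_segs = template_name.split('_')
--     redundant_segs = ['reveal', 'ar', 'act']
--     for redundant_seg in redundant_segs:
--         if redundant_seg in name_segs:
--             index = name_segs.index(redundant_seg)
--             name_segs = name_segs[:index]  # cut off everything behind redundant segment, looking at you skeleton_mercenary_reveal_02
--     return '_'.join(name_segs)
-- ===== SOURCE B (Python) =====
-- def get_enemy_template_main_name(template_name: str) -> str: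
--     redundant = {'reveal', 'ar', 'act'}
--     segs = template_name.split('_')
--     for i, seg in enumerate(segs):
--         if seg in redundant:
--             return '_'.join(segs[:i])
--     return '_'.join(segs)
-- ===== Notes on version B (the rewrite author's own statement) =====
-- stated objective: idiomatic
-- what changed: B makes a single left-to-right pass over the name segments and cuts at the first segment found in a marker set, instead of A's loop over the three markers that repeatedly scans and re-slices the segment list.
import Mathlib
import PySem

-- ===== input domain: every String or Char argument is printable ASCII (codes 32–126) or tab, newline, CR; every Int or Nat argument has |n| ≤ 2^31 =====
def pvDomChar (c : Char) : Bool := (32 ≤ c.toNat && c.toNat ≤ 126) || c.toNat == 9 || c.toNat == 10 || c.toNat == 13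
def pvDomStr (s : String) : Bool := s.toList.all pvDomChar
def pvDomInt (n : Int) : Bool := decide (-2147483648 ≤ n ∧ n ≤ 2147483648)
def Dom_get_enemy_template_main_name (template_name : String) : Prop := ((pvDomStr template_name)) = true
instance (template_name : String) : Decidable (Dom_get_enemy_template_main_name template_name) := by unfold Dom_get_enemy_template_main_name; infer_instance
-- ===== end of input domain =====

-- B replaces A's per-marker loop (scan + re-slice for each marker) by one left-to-right pass over
-- the segments that cuts at the first segment found in a marker set; objective: idiomatic.

-- ===== PORT A =====
def get_enemy_template_main_name (template_name : String) : String :=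
  let name_segs := (PySem.Str.split? template_name "_").getD []  -- sep "_" ≠ "", so split? is some
  let redundant_segs := ["reveal", "ar", "act"]
  let final := redundant_segs.foldl (fun segs redundant_seg =>
    if redundant_seg ∈ segs then
      match PySem.List.index? segs redundant_seg with
      | some i => PySem.List.slice segs none (some (i : Int))
      | none => segs
    else segs) name_segs
  PySem.Str.join "_" final

-- ===== PORT B =====
-- index (0-based) of the first segment that is in the marker set, as in B's enumerate loop
def altScan (markers : PySem.Set String) : List String → Option Nat
  | [] => none
  | s :: rest => if s ∈ markers then some 0 else (altScan markers rest).map (· + 1)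

def get_enemy_template_main_name_alt (template_name : String) : String :=
  let markers : PySem.Set String := PySem.Set.ofList ["reveal", "ar", "act"]
  let segs := (PySem.Str.split? template_name "_").getD []  -- sep "_" ≠ "", so split? is some
  match altScan markers segs with
  | some i => PySem.Str.join "_" (segs.take i)
  | none => PySem.Str.join "_" segs

-- ===== PRECONDITION & SPEC =====
def Spec_get_enemy_template_main_name (template_name : String) (out : String) : Prop := out = get_enemy_template_main_name_alt template_name
instance (template_name : String) (out : String) : Decidable (Spec_get_enemy_template_main_name template_name out) := by unfold Spec_get_enemy_template_main_name; infer_instance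

-- ===== CLAIM (what is proved, stated in full; the proofs are below) =====
def Claim_equal_get_enemy_template_main_name : Prop := ∀ (template_name : String), Dom_get_enemy_template_main_name template_name → Spec_get_enemy_template_main_name template_name (get_enemy_template_main_name template_name)

-- ===== LEMMAS AND PROOFS =====

-- A's one truncation step cuts exactly the prefix of segments different from the marker
lemma cut_eq_takeWhile (segs : List String) (m : String) :
    (if m ∈ segs then
      match PySem.List.index? segs m with
      | some i => PySem.List.slice segs none (some (i : Int))
      | none => segs
    else segs) = segs.takeWhile (fun s => s ≠ m) := by
  induction segs with
  | nil => simp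
  | cons a rest ih =>
    by_cases ha : a = m
    · subst ha
      rw [if_pos (List.mem_cons_self), PySem.List.index?_cons_self]
      have h0 : PySem.List.slice (a :: rest) none (some ((0 : Nat) : Int)) = (a :: rest).take 0 :=
        PySem.List.slice_to_natCast _ _
      simp only [Nat.cast_zero] at h0
      simp [h0]
    · have hne : a ≠ m := ha
      by_cases hm : m ∈ rest
      · obtain ⟨i, hi⟩ : ∃ i, PySem.List.index? rest m = some i := by
          have := (PySem.List.index?_isSome_iff (xs := rest) (v := m)).mpr hm
          exact Option.isSome_iff_exists.mp this
        rw [if_pos (List.mem_cons_of_mem a hm), PySem.List.index?_cons_of_ne rest hne, hi]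
        simp only [Option.map_some]
        have hsl : PySem.List.slice (a :: rest) none (some ((i + 1 : Nat) : Int)) =
            (a :: rest).take (i + 1) := PySem.List.slice_to_natCast _ _
        rw [hsl, List.take_succ_cons]
        rw [if_pos hm, hi] at ih
        have hsl' : PySem.List.slice rest none (some ((i : Nat) : Int)) = rest.take i :=
          PySem.List.slice_to_natCast _ _
        simpa [List.takeWhile_cons, hne, hsl'] using ih
      · have hnm : m ∉ a :: rest := by simp [hne.symm, hm]
        rw [if_neg hnm]
        rw [if_neg hm] at ih
        simpa [List.takeWhile_cons, hne] using ih

lemma takeWhile_takeWhile' (p q : String → Bool) (xs : List String) :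
    (xs.takeWhile q).takeWhile p = xs.takeWhile (fun x => q x && p x) := by
  induction xs with
  | nil => rfl
  | cons a rest ih =>
    by_cases hq : q a
    · by_cases hp : p a <;> simp [List.takeWhile, hq, hp, ih]
    · simp [List.takeWhile, hq]

-- B's scan-and-cut is the takeWhile on "not a marker"
lemma altScan_take (markers : PySem.Set String) (segs : List String) :
    (match altScan markers segs with
     | some i => segs.take i
     | none => segs) = segs.takeWhile (fun s => !(decide (s ∈ markers))) := by
  induction segs with
  | nil => rfl
  | cons a rest ih =>
    by_cases ha : a ∈ markers
    · simp [altScan, ha]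
    · simp only [altScan, if_neg ha]
      cases h : altScan markers rest with
      | none =>
        rw [h] at ih
        simp only at ih
        simp [List.takeWhile, ha, ← ih]
      | some i =>
        rw [h] at ih
        simp only at ih
        simp [List.takeWhile, ha, ← ih]

lemma marker_pred_eq :
    (fun x : String => !(decide (x ∈ (PySem.Set.ofList ["reveal", "ar", "act"] : PySem.Set String)))) =
    (fun x : String => decide (x ≠ "reveal") && (decide (x ≠ "ar") && decide (x ≠ "act"))) := by
  funext x
  by_cases h1 : x = "reveal" <;> by_cases h2 : x = "ar" <;> by_cases h3 : x = "act" <;>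
    simp [h1, h2, h3, PySem.Set.mem_ofList]

-- ===== VERDICT (by name: the statement is the Claim_ definition above) =====
theorem get_enemy_template_main_name_spec : Claim_equal_get_enemy_template_main_name := by
  intro t _
  unfold Spec_get_enemy_template_main_name get_enemy_template_main_name get_enemy_template_main_name_alt
  simp only
  set segs := (PySem.Str.split? t "_").getD [] with hsegs
  rw [List.foldl_cons, List.foldl_cons, List.foldl_cons, List.foldl_nil]
  rw [cut_eq_takeWhile, cut_eq_takeWhile, cut_eq_takeWhile]
  rw [takeWhile_takeWhile', takeWhile_takeWhile']
  have hs := altScan_take (PySem.Set.ofList ["reveal", "ar", "act"]) segs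
  rw [marker_pred_eq] at hs
  cases h : altScan (PySem.Set.ofList ["reveal", "ar", "act"]) segs with
  | none =>
    rw [h] at hs
    simp only at hs
    rw [← hs]
  | some i =>
    rw [h] at hs
    simp only at hs
    rw [← hs]
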